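-- pv_equiv track=rewrite | github.com/CamelliaRui/PhD_Agent | generate_meeting_agenda_simple.py | generate_meeting_agenda_template
-- ===== SOURCE A (Python) =====
-- def generate_meeting_agenda_template(progress_items: list = None) -> str:
--     """
--     Generate meeting agenda in Notion template format
--     """
--     agenda = "## Progress over the week:\n\n"
--
--     if progress_items:
--         for i, item in enumerate(progress_items[:3], 1):
--             agenda += f"{i}. {item}\n\n"
--         for i in range(len(progress_items) + 1, 4):
--             agenda += f"{i}.\n\n"
--     else:
--         agenda += "1.\n\n2.\n\n3.\n\n"
--
--     agenda += "## Results & Obstacles\n\n"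
--     agenda += "1.\n\n2.\n\n3.\n\n"
--
--     agenda += "## Plan for Next Week\n\n"
--     agenda += "1.\n\n2.\n\n3."
--
--     return agenda
-- ===== SOURCE B (Python) =====
-- def generate_meeting_agenda_template(progress_items: list = None) -> str:
--     """Data-driven rendering: the agenda is a table of (title, items) sections,
--     each rendered by one generic renderer over sentinel-padded slots."""
--     items = list(progress_items or [])[:3]
--     sections = [
--         ("## Progress over the week:", items),
--         ("## Results & Obstacles", []),
--         ("## Plan for Next Week", []),
--     ]
--     parts = []
--     for title, its in sections:
--         slots = its + [None] * (3 - len(its))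
--         body = []
--         for n, text in enumerate(slots, 1):
--             body.append(f"{n}." if text is None else f"{n}. {text}")
--         parts.append(title + "\n\n" + "\n\n".join(body))
--     return "\n\n".join(parts)
-- ===== Notes on version B (the rewrite author's own statement) =====
-- stated objective: simpler
-- what changed: B is data-driven: the agenda is a table of (title, items) sections rendered by one generic renderer over sentinel-padded (None) slots and joined once, replacing A's imperative string accumulation with a truthiness branch, two separate numbering/blank-filling loops and hardcoded literals for the other two sections.
import Mathlib
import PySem

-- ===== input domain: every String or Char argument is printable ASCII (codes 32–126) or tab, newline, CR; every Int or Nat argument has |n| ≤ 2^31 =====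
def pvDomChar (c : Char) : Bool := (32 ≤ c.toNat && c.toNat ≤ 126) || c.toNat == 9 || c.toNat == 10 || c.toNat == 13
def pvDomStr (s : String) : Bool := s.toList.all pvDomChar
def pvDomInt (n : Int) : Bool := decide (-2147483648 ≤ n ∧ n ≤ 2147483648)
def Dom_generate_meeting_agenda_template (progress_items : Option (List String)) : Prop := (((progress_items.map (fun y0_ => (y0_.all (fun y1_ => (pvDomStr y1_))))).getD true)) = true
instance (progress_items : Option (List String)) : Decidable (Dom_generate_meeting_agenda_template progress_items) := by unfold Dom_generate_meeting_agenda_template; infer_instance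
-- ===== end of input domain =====

-- B renders the agenda data-driven: a table of (title, items) sections, each rendered by one
-- generic renderer over sentinel-padded slots, joined once — instead of A's imperative string
-- accumulation with a truthiness branch, two loops and hardcoded section literals; objective: simpler.

-- ===== PORT A =====
def generate_meeting_agenda_template (progress_items : Option (List String)) : String :=
  let agenda := "## Progress over the week:\n\n"
  let agenda :=
    -- `if progress_items:` — truthy iff Some nonempty list
    match progress_items with
    | some items =>
      if items.isEmpty then
        agenda ++ "1.\n\n2.\n\n3.\n\n"
      else
        -- for i, item in enumerate(progress_items[:3], 1): agenda += f"{i}. {item}\n\n"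
        let agenda := (PySem.List.enumerate (PySem.List.slice items none (some 3)) 1).foldl
          (fun acc p => acc ++ (PySem.Int.toStr p.1 ++ ". " ++ p.2 ++ "\n\n")) agenda
        -- for i in range(len(progress_items) + 1, 4): agenda += f"{i}.\n\n"
        (PySem.List.pyRange ((items.length : Int) + 1) 4 1).foldl
          (fun acc i => acc ++ (PySem.Int.toStr i ++ ".\n\n")) agenda
    | none => agenda ++ "1.\n\n2.\n\n3.\n\n"
  agenda ++ "## Results & Obstacles\n\n" ++ "1.\n\n2.\n\n3.\n\n"
    ++ "## Plan for Next Week\n\n" ++ "1.\n\n2.\n\n3."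

-- ===== PORT B =====
def generate_meeting_agenda_template_alt (progress_items : Option (List String)) : String :=
  -- items = list(progress_items or [])[:3]
  let items := PySem.List.slice
    (match progress_items with
     | some l => if l.isEmpty then [] else l
     | none => []) none (some 3)
  -- sections = [(title, items), (title, []), (title, [])]
  let sections : List (String × List String) :=
    [("## Progress over the week:", items),
     ("## Results & Obstacles", []),
     ("## Plan for Next Week", [])]
  -- for title, its in sections: render its sentinel-padded slots and collect the part
  let parts := sections.foldl (fun parts sec =>
    -- slots = its + [None] * (3 - len(its))
    let slots : List (Option String) := sec.2.map some ++ List.replicate (3 - sec.2.length) none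
    let body := (PySem.List.enumerate slots 1).foldl (fun body nt =>
      body ++ [match nt.2 with
               | none => PySem.Int.toStr nt.1 ++ "."
               | some text => PySem.Int.toStr nt.1 ++ ". " ++ text]) []
    parts ++ [sec.1 ++ "\n\n" ++ PySem.Str.join "\n\n" body]) []
  PySem.Str.join "\n\n" parts

-- ===== PRECONDITION & SPEC =====
def Spec_generate_meeting_agenda_template (progress_items : Option (List String)) (out : String) : Prop := out = generate_meeting_agenda_template_alt progress_items
instance (progress_items : Option (List String)) (out : String) : Decidable (Spec_generate_meeting_agenda_template progress_items out) := by unfold Spec_generate_meeting_agenda_template; infer_instance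

-- ===== CLAIM (what is proved, stated in full; the proofs are below) =====
def Claim_equal_generate_meeting_agenda_template : Prop := ∀ (progress_items : Option (List String)), Dom_generate_meeting_agenda_template progress_items → Spec_generate_meeting_agenda_template progress_items (generate_meeting_agenda_template progress_items)

-- ===== LEMMAS AND PROOFS =====

theorem agenda_eq_long (a b c : String) (rest : List String) :
    generate_meeting_agenda_template (some (a :: b :: c :: rest)) =
      generate_meeting_agenda_template_alt (some (a :: b :: c :: rest)) := by
  have hnil : PySem.List.pyRange ((rest.length : Int) + 1 + 1 + 1 + 1) 4 1 = [] := by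
    apply PySem.List.pyRange_one_eq_nil
    omega
  have hslice : PySem.List.slice (a :: b :: c :: rest) none (some 3) = [a, b, c] := by
    simp [PySem.List.slice, List.take]
  have hd1 : Nat.toDigits 10 1 = ['1'] := by decide
  have hd2 : Nat.toDigits 10 2 = ['2'] := by decide
  have hd3 : Nat.toDigits 10 3 = ['3'] := by decide
  apply String.toList_injective
  simp [generate_meeting_agenda_template, generate_meeting_agenda_template_alt, hnil, hslice,
    PySem.List.enumerate, PySem.Int.toStr, PySem.Int.toChars, PySem.Str.join, PySem.Chars.join,
    List.intercalate, List.replicate, hd1, hd2, hd3]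
  decide

theorem agenda_eq_one (a : String) :
    generate_meeting_agenda_template (some [a]) =
      generate_meeting_agenda_template_alt (some [a]) := by
  have hr2 : PySem.List.pyRange 2 4 1 = [2, 3] := by decide
  have hd1 : Nat.toDigits 10 1 = ['1'] := by decide
  have hd2 : Nat.toDigits 10 2 = ['2'] := by decide
  have hd3 : Nat.toDigits 10 3 = ['3'] := by decide
  apply String.toList_injective
  simp [generate_meeting_agenda_template, generate_meeting_agenda_template_alt, hr2,
    PySem.List.slice, PySem.List.enumerate, PySem.Int.toStr, PySem.Int.toChars,
    PySem.Str.join, PySem.Chars.join, List.intercalate, List.replicate, hd1, hd2, hd3]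
  decide

theorem agenda_eq_two (a b : String) :
    generate_meeting_agenda_template (some [a, b]) =
      generate_meeting_agenda_template_alt (some [a, b]) := by
  have hr3 : PySem.List.pyRange 3 4 1 = [3] := by decide
  have hd1 : Nat.toDigits 10 1 = ['1'] := by decide
  have hd2 : Nat.toDigits 10 2 = ['2'] := by decide
  have hd3 : Nat.toDigits 10 3 = ['3'] := by decide
  apply String.toList_injective
  simp [generate_meeting_agenda_template, generate_meeting_agenda_template_alt, hr3,
    PySem.List.slice, PySem.List.enumerate, PySem.Int.toStr, PySem.Int.toChars,
    PySem.Str.join, PySem.Chars.join, List.intercalate, List.replicate, hd1, hd2, hd3]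
  decide

-- ===== VERDICT (by name: the statement is the Claim_ definition above) =====
theorem generate_meeting_agenda_template_spec : Claim_equal_generate_meeting_agenda_template := by
  intro progress_items _
  unfold Spec_generate_meeting_agenda_template
  match progress_items with
  | none => rfl
  | some [] => rfl
  | some [a] => exact agenda_eq_one a
  | some [a, b] => exact agenda_eq_two a b
  | some (a :: b :: c :: rest) => exact agenda_eq_long a b c rest
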